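-- pv_equiv track=rewrite | github.com/guillemJDA24/index_Boira | boira.py | comptarFrases
-- ===== SOURCE A (Python) =====
-- def comptarFrases(text):
--   conf=0
--   for f in text:
--     if f =='.':
--       conf=conf+1
--     elif f==':':
--       conf=conf+1
--     elif f==';':
--       conf=conf+1
--   return conf
-- ===== SOURCE B (Python) =====
-- def comptarFrases(text):
--   # Delete all '.', ':', ';' from the text in one translate pass;
--   # the count is the length lost by that deletion.
--   return len(text) - len(text.translate(str.maketrans('', '', '.:;')))
-- ===== Notes on version B (the rewrite author's own statement) =====
-- stated objective: faster
-- what changed: Instead of counting matches character by character in a Python loop, B deletes the three sentence characters with str.translate in one C-level pass and returns the length difference of the two strings.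
import Mathlib
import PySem

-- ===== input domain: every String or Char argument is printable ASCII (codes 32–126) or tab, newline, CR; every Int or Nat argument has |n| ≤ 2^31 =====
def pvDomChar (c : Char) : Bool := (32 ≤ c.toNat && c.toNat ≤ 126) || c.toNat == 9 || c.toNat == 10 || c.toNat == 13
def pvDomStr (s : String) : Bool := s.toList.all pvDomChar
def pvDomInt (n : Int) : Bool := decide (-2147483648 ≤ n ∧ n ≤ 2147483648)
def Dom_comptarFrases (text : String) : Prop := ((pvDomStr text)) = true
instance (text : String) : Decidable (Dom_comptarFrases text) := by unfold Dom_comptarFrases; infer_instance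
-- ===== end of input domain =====

-- B deletes '.', ':', ';' via str.translate and returns the length difference, instead of A's per-character counting loop.
-- ===== PORT A =====
def comptarFrases (text : String) : Int :=
  text.toList.foldl (fun conf f =>
    if f = '.' then conf + 1
    else if f = ':' then conf + 1
    else if f = ';' then conf + 1
    else conf) 0

-- ===== PORT B =====
-- str.translate with a pure deletion table '.:;' keeps exactly the characters not in {'.',':',';'};
-- ported exactly as a filter dropping those three characters.
def comptarFrases_alt (text : String) : Int :=
  (text.toList.length : Int) -
    ((text.toList.filter (fun c => !(c == '.' || c == ':' || c == ';'))).length : Int)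

-- ===== PRECONDITION & SPEC =====
def Spec_comptarFrases (text : String) (out : Int) : Prop := out = comptarFrases_alt text
instance (text : String) (out : Int) : Decidable (Spec_comptarFrases text out) := by unfold Spec_comptarFrases; infer_instance

-- ===== CLAIM (what is proved, stated in full; the proofs are below) =====
def Claim_equal_comptarFrases : Prop := ∀ (text : String), Dom_comptarFrases text → Spec_comptarFrases text (comptarFrases text)

-- ===== LEMMAS AND PROOFS =====
theorem comptarFrases_foldl_len (l : List Char) (acc : Int) :
    l.foldl (fun conf f =>
      if f = '.' then conf + 1
      else if f = ':' then conf + 1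
      else if f = ';' then conf + 1
      else conf) acc
    = acc + (l.length : Int)
        - ((l.filter (fun c => !(c == '.' || c == ':' || c == ';'))).length : Int) := by
  induction l generalizing acc with
  | nil => simp
  | cons x xs ih =>
    simp only [List.foldl_cons, List.length_cons, List.filter_cons, ih]
    by_cases h1 : x = '.' <;> by_cases h2 : x = ':' <;> by_cases h3 : x = ';' <;>
      simp_all <;> ring

-- ===== VERDICT (by name: the statement is the Claim_ definition above) =====
theorem comptarFrases_spec : Claim_equal_comptarFrases := by
  intro text _
  show comptarFrases text = comptarFrases_alt text
  simp [comptarFrases, comptarFrases_alt, comptarFrases_foldl_len]
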